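-- pv_equiv track=rewrite | github.com/mateusmsant/lubyteste | logica/1.9_logica.py | stringToArray
-- ===== SOURCE A (Python) =====
-- def stringToArray(string):
--   vetorRetorno = []
--   miniVetor = []
--
--   for num in string:
--     if num != "," and num != " ":
--       miniVetor.append(num)
--       if len(miniVetor) == 2:
--         vetorRetorno.append(miniVetor)
--         miniVetor = []
--
--   return vetorRetorno
-- ===== SOURCE B (Python) =====
-- def stringToArray(string):
--     filtered = [c for c in string if c != "," and c != " "]
--     return [filtered[2 * i : 2 * i + 2] for i in range(len(filtered) // 2)]
-- ===== Notes on version B (the rewrite author's own statement) =====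
-- stated objective: alternative
-- what changed: Replaces A's single stateful pass (a running buffer emitted whenever it reaches size 2) with two stateless passes: a filter removing delimiters, then a strided slice comprehension over range(len//2) that cuts the filtered list into pairs (len//2 drops a lone trailing character exactly as A does).
import Mathlib
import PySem

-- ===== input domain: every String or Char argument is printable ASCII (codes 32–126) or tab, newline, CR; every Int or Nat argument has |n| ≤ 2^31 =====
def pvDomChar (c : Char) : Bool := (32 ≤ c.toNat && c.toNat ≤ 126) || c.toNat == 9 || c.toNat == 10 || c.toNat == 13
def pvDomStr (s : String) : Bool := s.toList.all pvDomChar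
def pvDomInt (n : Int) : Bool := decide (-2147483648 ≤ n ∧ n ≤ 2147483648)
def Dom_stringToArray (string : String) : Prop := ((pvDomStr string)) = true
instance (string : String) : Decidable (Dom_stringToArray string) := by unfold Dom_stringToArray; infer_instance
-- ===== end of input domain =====

-- B replaces A's single stateful pass (buffer emitted at size 2) with a filter pass
-- followed by a strided slice comprehension (objective: alternative decomposition).

-- ===== PORT A =====
-- one step of A's loop body: state = (vetorRetorno, miniVetor)
def pvStepA (st : List (List String) × List String) (num : Char) :
    List (List String) × List String :=
  if num ≠ ',' ∧ num ≠ ' ' then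
    let mini := st.2 ++ [String.ofList [num]]
    if mini.length = 2 then (st.1 ++ [mini], []) else (st.1, mini)
  else st

def stringToArray (string : String) : List (List String) :=
  (string.toList.foldl pvStepA ([], [])).1

-- ===== PORT B =====
def stringToArray_alt (string : String) : List (List String) :=
  let filtered := (string.toList.filter (fun c => c ≠ ',' && c ≠ ' ')).map
    (fun c => String.ofList [c])
  (PySem.List.pyRange 0 (PySem.Int.floordiv (filtered.length : Int) 2) 1).map
    (fun i => PySem.List.slice filtered (some (2 * i)) (some (2 * i + 2)))

-- ===== PRECONDITION & SPEC =====
def Spec_stringToArray (string : String) (out : List (List String)) : Prop := out = stringToArray_alt string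
instance (string : String) (out : List (List String)) : Decidable (Spec_stringToArray string out) := by unfold Spec_stringToArray; infer_instance

-- ===== CLAIM (what is proved, stated in full; the proofs are below) =====
def Claim_equal_stringToArray : Prop := ∀ (string : String), Dom_stringToArray string → Spec_stringToArray string (stringToArray string)

-- ===== LEMMAS AND PROOFS =====

-- proof-only helper: chunk a list into consecutive pairs, dropping a lone leftover
def pvChunk2 {α : Type} : List α → List (List α)
  | a :: b :: t => [a, b] :: pvChunk2 t
  | _ => []

theorem pvChunk_eq {α : Type} : (l : List α) →
    (List.range (l.length / 2)).map (fun k => (l.drop (2 * k)).take 2) = pvChunk2 l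
  | [] => by simp [pvChunk2]
  | [a] => by simp [pvChunk2]
  | a :: b :: t => by
    have ih := pvChunk_eq t
    have hlen : (a :: b :: t).length / 2 = t.length / 2 + 1 := by
      simp [List.length]; omega
    rw [hlen, List.range_succ_eq_map]
    simp only [List.map_cons, List.map_map, pvChunk2]
    congr 1

theorem pvFoldA (l : List Char) :
    (∀ ret : List (List String),
      (l.foldl pvStepA (ret, [])).1 =
        ret ++ pvChunk2 ((l.filter (fun c => c ≠ ',' && c ≠ ' ')).map (fun c => String.ofList [c]))) ∧
    (∀ (ret : List (List String)) (x : String),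
      (l.foldl pvStepA (ret, [x])).1 =
        ret ++ pvChunk2 (x :: (l.filter (fun c => c ≠ ',' && c ≠ ' ')).map (fun c => String.ofList [c]))) := by
  induction l with
  | nil => simp [pvChunk2]
  | cons c t ih =>
    by_cases hc : c ≠ ',' ∧ c ≠ ' '
    · refine ⟨fun ret => ?_, fun ret x => ?_⟩
      · simp only [List.foldl_cons, pvStepA, if_pos hc, List.nil_append, List.length_cons,
          List.length_nil]
        norm_num
        rw [(ih.2) ret (String.ofList [c])]
        simp [hc.1, hc.2]
      · simp only [List.foldl_cons, pvStepA, if_pos hc]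
        norm_num
        rw [(ih.1) (ret ++ [[x, String.ofList [c]]])]
        simp [hc.1, hc.2, pvChunk2]
    · have hb : ¬(c ≠ ',' && c ≠ ' ') = true := by
        simp only [Bool.and_eq_true, decide_eq_true_eq, ne_eq]; tauto
      refine ⟨fun ret => ?_, fun ret x => ?_⟩
      · simp only [List.foldl_cons, pvStepA, if_neg hc]
        rw [(ih.1) ret]
        simp [hc]
      · simp only [List.foldl_cons, pvStepA, if_neg hc]
        rw [(ih.2) ret x]
        simp [hc]

theorem pvAlt_eq (s : String) :
    stringToArray_alt s =
      pvChunk2 ((s.toList.filter (fun c => c ≠ ',' && c ≠ ' ')).map (fun c => String.ofList [c])) := by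
  simp only [stringToArray_alt]
  set l := (s.toList.filter (fun c => c ≠ ',' && c ≠ ' ')).map (fun c => String.ofList [c]) with hl
  have hfd : PySem.Int.floordiv (l.length : Int) 2 = ((l.length / 2 : Nat) : Int) := by
    rw [PySem.Int.floordiv, Int.fdiv_eq_ediv]
    simp
  rw [hfd, PySem.List.pyRange_one, ← pvChunk_eq l]
  simp only [List.map_map, Int.sub_zero, Int.toNat_natCast]
  apply List.map_congr_left
  intro k _
  have : (2 : Int) * ((0:Int) + (k:Nat)) = ((2 * k : Nat) : Int) := by push_cast; ring
  simp only [Function.comp, this]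
  have h2 : ((2 * k : Nat) : Int) + 2 = ((2 * k : Nat) : Int) + ((2 : Nat) : Int) := by norm_num
  rw [h2, PySem.List.slice_natCast_add]

-- ===== VERDICT (by name: the statement is the Claim_ definition above) =====
theorem stringToArray_spec : Claim_equal_stringToArray := by
  intro s _
  unfold Spec_stringToArray stringToArray
  rw [pvAlt_eq, (pvFoldA s.toList).1 [], List.nil_append]
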